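-- pv_equiv track=rewrite | github.com/simsekhalit/CookSheets-Algorithms | problems/hackerrank-largest-rectangle/solution2.py | findRightSpan
-- ===== SOURCE A (Python) =====
-- def findRightSpan(h):
--     size = len(h)
--
--     # Create the span array with all values are 0 and
--     # put 1 on the last item since the span of the last item is always 1
--     spans = [0] * size
--     spans[-1] = 1
--
--     # Create the stack and put last item to stack.
--     stack = [size - 1]
--
--     for i in range(size - 2, -1, -1):
--         # Pop top of the stack as long as it is greater than or equal to the current element
--         # Because stack must contain only elements that current element would not be able to span to
--         while len(stack) != 0 and h[stack[-1]] >= h[i]: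
--             stack.pop()
--
--         # If stack is empty then it means current element spans to all the way to the right
--         if len(stack) == 0:
--             spans[i] = size - i
--
--         # Otherwise current element can only span as far as to the element which is on the top of the stack
--         else:
--             spans[i] = stack[-1] - i
--
--         # Add the current element to the top of the stack
--         stack.append(i)
--
--     return spans
-- ===== SOURCE B (Python) =====
-- def findRightSpan(h):
--     size = len(h)
--     spans = [0] * size
--     for i in range(size - 1, -1, -1):
--         j = i + 1
--         # jump over blocks already known to be spanned (spans[j] is the
--         # distance to the next smaller element right of j)
--         while j < size and h[j] >= h[i]:
--             j += spans[j]
--         spans[i] = j - i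
--     return spans
-- ===== Notes on version B (the rewrite author's own statement) =====
-- stated objective: alternative
-- what changed: Replaced the explicit monotonic stack with a jump-pointer pass: iterating right-to-left, the inner loop advances j by the already-computed span spans[j] instead of popping a stack, so no stack is maintained at all.
import Mathlib
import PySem

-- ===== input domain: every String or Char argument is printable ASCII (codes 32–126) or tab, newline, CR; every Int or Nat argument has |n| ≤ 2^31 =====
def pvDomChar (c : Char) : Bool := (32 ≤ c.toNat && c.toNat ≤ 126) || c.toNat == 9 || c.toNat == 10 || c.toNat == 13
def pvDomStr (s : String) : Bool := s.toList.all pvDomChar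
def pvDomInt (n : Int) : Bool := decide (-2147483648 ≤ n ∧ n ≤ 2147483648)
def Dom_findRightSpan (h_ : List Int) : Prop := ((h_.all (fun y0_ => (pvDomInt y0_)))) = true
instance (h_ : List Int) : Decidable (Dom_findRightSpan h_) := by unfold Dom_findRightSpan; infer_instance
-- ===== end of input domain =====

-- B replaces A's monotonic stack by a jump-pointer pass over the result array (objective: alternative, same O(n)).

-- ===== PORT A =====
-- the inner 'while' popping the stack (Python stack top = list end; here top = list head)
def popA (h : List Int) (hi : Int) : List Int → List Int
  | [] => []
  | t :: rest => if PySem.List.pyGetD h t 0 ≥ hi then popA h hi rest else t :: rest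

-- one iteration of A's for-loop: pop, write spans[i], push i
def stepA (h : List Int) (size : Int) (st : List Int × List Int) (i : Int) : List Int × List Int :=
  let stack := popA h (PySem.List.pyGetD h i 0) st.2
  match stack with
  | [] => (PySem.List.pySetD st.1 i (size - i), [i])
  | t :: rest => (PySem.List.pySetD st.1 i (t - i), i :: t :: rest)

def findRightSpan (h_ : List Int) : List Int :=
  let size : Int := h_.length
  let spans : List Int := List.replicate h_.length 0
  let spans := PySem.List.pySetD spans (-1) 1
  ((PySem.List.pyRange (size - 2) (-1) (-1)).foldl (stepA h_ size) (spans, [size - 1])).1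

-- ===== PORT B =====
-- B's inner 'while j < size and h[j] >= h[i]: j += spans[j]'; the fuel (h.length) only
-- makes the recursion structural — each jump advances j by at least 1, so it never runs out
def jumpB (h : List Int) (size : Int) (spans : List Int) (x : Int) : Nat → Int → Int
  | 0, j => j
  | fuel + 1, j =>
    if j < size ∧ PySem.List.pyGetD h j 0 ≥ x then
      jumpB h size spans x fuel (j + PySem.List.pyGetD spans j 0)
    else j

def stepB (h : List Int) (size : Int) (spans : List Int) (i : Int) : List Int :=
  PySem.List.pySetD spans i (jumpB h size spans (PySem.List.pyGetD h i 0) h.length (i + 1) - i)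

def findRightSpan_alt (h_ : List Int) : List Int :=
  let size : Int := h_.length
  (PySem.List.pyRange (size - 1) (-1) (-1)).foldl (stepB h_ size) (List.replicate h_.length 0)

-- ===== PRECONDITION & SPEC =====
-- Pre_ excludes only the empty list, on which A raises IndexError when writing the last span entry.
def Pre_findRightSpan (h_ : List Int) : Prop := h_ ≠ []
instance (h_ : List Int) : Decidable (Pre_findRightSpan h_) := by unfold Pre_findRightSpan; infer_instance
def pvWitness_findRightSpan : List Int := [2, 1, 3]

def Spec_findRightSpan (h_ : List Int) (out : List Int) : Prop := out = findRightSpan_alt h_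
instance (h_ : List Int) (out : List Int) : Decidable (Spec_findRightSpan h_ out) := by unfold Spec_findRightSpan; infer_instance

-- ===== CLAIM (what is proved, stated in full; the proofs are below) =====
def Claim_equal_findRightSpan : Prop := ∀ (h_ : List Int), Dom_findRightSpan h_ → Pre_findRightSpan h_ → Spec_findRightSpan h_ (findRightSpan h_)

-- ===== LEMMAS AND PROOFS =====

-- the common specification: nsm h i = first index j > i with h[j] < h[i], else h.length
def nsmAux (h : List Int) (x : Int) (j : Nat) : Nat :=
  if _hj : j < h.length then (if h.getD j 0 < x then j else nsmAux h x (j + 1)) else j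
termination_by h.length - j

def nsm (h : List Int) (i : Nat) : Nat := nsmAux h (h.getD i 0) (i + 1)

lemma nsmAux_ge (h : List Int) (x : Int) (j : Nat) : j ≤ nsmAux h x j := by
  unfold nsmAux
  split_ifs with h1 h2
  · exact le_refl _
  · exact le_trans (Nat.le_succ _) (nsmAux_ge h x (j + 1))
  · exact le_refl _
termination_by h.length - j

lemma nsmAux_le (h : List Int) (x : Int) (j : Nat) (hj : j ≤ h.length) : nsmAux h x j ≤ h.length := by
  unfold nsmAux
  split_ifs with h1 h2
  · omega
  · exact nsmAux_le h x (j + 1) (by omega)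
  · omega
termination_by h.length - j

lemma nsmAux_min (h : List Int) (x : Int) (j : Nat) :
    ∀ m, j ≤ m → m < nsmAux h x j → x ≤ h.getD m 0 := by
  intro m hm1 hm2
  unfold nsmAux at hm2
  split_ifs at hm2 with h1 h2
  · omega
  · rcases Nat.eq_or_lt_of_le hm1 with rfl | hlt
    · omega
    · exact nsmAux_min h x (j + 1) m (by omega) hm2
  · omega
termination_by h.length - j

lemma nsmAux_eq_of (h : List Int) (x : Int) (j k : Nat) (hjk : j ≤ k) (hkl : k ≤ h.length)
    (hmin : ∀ m, j ≤ m → m < k → x ≤ h.getD m 0)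
    (hk : k = h.length ∨ h.getD k 0 < x) : nsmAux h x j = k := by
  unfold nsmAux
  split_ifs with h1 h2
  · -- j < length and h[j] < x: must have j = k
    rcases Nat.eq_or_lt_of_le hjk with rfl | hlt
    · rfl
    · exact absurd (hmin j le_rfl hlt) (by omega)
  · -- j < length, h[j] ≥ x: recurse
    rcases Nat.eq_or_lt_of_le hjk with rfl | hlt
    · rcases hk with hke | hke <;> omega
    · exact nsmAux_eq_of h x (j + 1) k (by omega) hkl (fun m hm1 hm2 => hmin m (by omega) hm2) hk
  · -- j ≥ length: j = length = k
    omega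
termination_by h.length - j

lemma nsm_gt (h : List Int) (i : Nat) : i < nsm h i := lt_of_lt_of_le (Nat.lt_succ_self i) (nsmAux_ge _ _ _)

lemma nsm_le (h : List Int) (i : Nat) (hi : i < h.length) : nsm h i ≤ h.length :=
  nsmAux_le _ _ _ (by omega)

lemma nsm_min (h : List Int) (i : Nat) : ∀ m, i < m → m < nsm h i → h.getD i 0 ≤ h.getD m 0 :=
  fun m hm1 hm2 => nsmAux_min h _ (i + 1) m (by omega) hm2

lemma nsm_eq_of (h : List Int) (i k : Nat) (hik : i < k) (hkl : k ≤ h.length)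
    (hmin : ∀ m, i < m → m < k → h.getD i 0 ≤ h.getD m 0)
    (hk : k = h.length ∨ h.getD k 0 < h.getD i 0) : nsm h i = k :=
  nsmAux_eq_of h _ (i + 1) k (by omega) hkl (fun m hm1 hm2 => hmin m (by omega) hm2) hk

-- the chain of successive next-smaller indices starting at j (A's stack contents)
def chain (h : List Int) (j : Nat) : List Nat :=
  j :: (if _hlt : nsm h j < h.length then chain h (nsm h j) else [])
termination_by h.length - j
decreasing_by have := nsm_gt h j; omega

lemma getD_set (xs : List Int) (n k : Nat) (v : Int) :
    (xs.set n v).getD k 0 = if k = n ∧ n < xs.length then v else xs.getD k 0 := by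
  simp only [List.getD_eq_getElem?_getD, List.getElem?_set]
  split_ifs with h1 h2 h3 h4 <;> simp_all

-- invariant on the spans array: entries at indices ≥ i are already correct, the rest are 0
def SpansOK (h : List Int) (i : Nat) (s : List Int) : Prop :=
  s.length = h.length ∧ ∀ k, k < h.length → s.getD k 0 = if i ≤ k then ((nsm h k : Int) - k) else 0

lemma popChain (h : List Int) (i j : Nat) (hij : i < j) (hjl : j < h.length)
    (hmin : ∀ m, i < m → m < j → h.getD i 0 ≤ h.getD m 0) :
    popA h (h.getD i 0) ((chain h j).map (Nat.cast : Nat → Int)) =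
      if nsm h i < h.length then (chain h (nsm h i)).map (Nat.cast : Nat → Int) else [] := by
  rw [chain]
  simp only [List.map_cons, popA]
  have hg : PySem.List.pyGetD h (j : Int) 0 = h.getD j 0 := by
    simp [PySem.List.pyGetD_natCast]
  by_cases hcmp : h.getD i 0 ≤ h.getD j 0
  · -- pop j, continue with the tail
    rw [if_pos (by rw [hg]; exact hcmp)]
    by_cases htail : nsm h j < h.length
    · rw [dif_pos htail]
      have := nsm_gt h j
      exact popChain h i (nsm h j) (by omega) htail
        (fun m hm1 hm2 => by
          by_cases hmj : m < j
          · exact hmin m hm1 hmj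
          · by_cases hmej : m = j
            · subst hmej; exact hcmp
            · exact le_trans hcmp (nsm_min h j m (by omega) hm2))
    · -- tail empty: everything to the right is ≥ h[i], so nsm h i = length
      rw [dif_neg htail]
      have hjle := nsm_le h j hjl
      have hnj : nsm h j = h.length := by omega
      have : nsm h i = h.length := by
        apply nsm_eq_of h i h.length (by omega) le_rfl _ (Or.inl rfl)
        intro m hm1 hm2
        by_cases hmj : m < j
        · exact hmin m hm1 hmj
        · by_cases hmej : m = j
          · subst hmej; exact hcmp
          · exact le_trans hcmp (nsm_min h j m (by omega) (by omega))
      rw [this]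
      simp [popA]
  · -- h[j] < h[i]: j is the next smaller element of i
    rw [if_neg (by rw [hg]; omega)]
    have : nsm h i = j := nsm_eq_of h i j hij (by omega) hmin (Or.inr (by omega))
    rw [this, if_pos hjl]
    conv_rhs => rw [chain]
    simp
termination_by h.length - j
decreasing_by have := nsm_gt h j; omega

lemma stepA_inv (h : List Int) (i : Nat) (hi1 : i + 1 < h.length) (s : List Int × List Int)
    (hs : SpansOK h (i + 1) s.1) (hst : s.2 = (chain h (i + 1)).map (Nat.cast : Nat → Int)) :
    SpansOK h i (stepA h h.length s (i : Int)).1 ∧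
      (stepA h h.length s (i : Int)).2 = (chain h i).map (Nat.cast : Nat → Int) := by
  obtain ⟨hlen, hval⟩ := hs
  have hpop : popA h (PySem.List.pyGetD h (i : Int) 0) s.2 =
      if nsm h i < h.length then (chain h (nsm h i)).map (Nat.cast : Nat → Int) else [] := by
    rw [hst, show PySem.List.pyGetD h (i : Int) 0 = h.getD i 0 by simp [PySem.List.pyGetD_natCast]]
    exact popChain h i (i + 1) (by omega) hi1 (by omega)
  have hset : ∀ v : Int, PySem.List.pySetD s.1 (i : Int) v = s.1.set i v := by
    intro v; simp [PySem.List.pySetD_natCast]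
  have hnle := nsm_le h i (by omega)
  by_cases hlt : nsm h i < h.length
  · -- stack nonempty: top = nsm h i
    rw [if_pos hlt, chain] at hpop
    unfold stepA
    rw [hpop]
    simp only [List.map_cons, hset]
    constructor
    · refine ⟨by simp [hlen], ?_⟩
      intro k hk
      rw [getD_set]
      by_cases hki : k = i
      · subst hki; simp [hlen, hk]
      · rw [if_neg (by simp [hki])]
        rw [hval k hk]
        split_ifs <;> omega
    · conv_rhs => rw [chain, dif_pos hlt, chain]
      simp
  · -- stack empty: spans all the way right
    rw [if_neg hlt] at hpop
    unfold stepA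
    rw [hpop]
    simp only [hset]
    have hni : nsm h i = h.length := by omega
    constructor
    · refine ⟨by simp [hlen], ?_⟩
      intro k hk
      rw [getD_set]
      by_cases hki : k = i
      · subst hki; simp [hlen, hk, hni]
      · rw [if_neg (by simp [hki])]
        rw [hval k hk]
        split_ifs <;> omega
    · rw [chain, dif_neg hlt]
      simp

lemma pyRange_countdown (n : Nat) :
    PySem.List.pyRange ((n : Int) - 1) (-1) (-1) = (List.range n).reverse.map (Nat.cast : Nat → Int) := by
  induction n with
  | zero => rw [PySem.List.pyRange_neg_one_eq_nil (by omega)]; simp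
  | succ m ih =>
    rw [PySem.List.pyRange_neg_one_cons (by omega)]
    rw [show ((m + 1 : Nat) : Int) - 1 = (m : Int) from by push_cast; ring]
    rw [show (m : Int) - 1 = ((m : Nat) : Int) - 1 from rfl, ih]
    rw [List.range_succ]
    simp

lemma foldA (h : List Int) : ∀ (n : Nat), n ≤ h.length - 1 → ∀ s : List Int × List Int,
    SpansOK h n s.1 → s.2 = (chain h n).map (Nat.cast : Nat → Int) →
    SpansOK h 0 ((((List.range n).reverse.map (Nat.cast : Nat → Int)).foldl (stepA h h.length) s).1) := by
  intro n
  induction n with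
  | zero => intro _ s hs _; simpa using hs
  | succ m ih =>
    intro hn s hs hst
    rw [List.range_succ, List.reverse_append]
    simp only [List.reverse_cons, List.reverse_nil, List.nil_append, List.map_cons,
      List.singleton_append, List.foldl_cons]
    have hm1 : m + 1 < h.length := by omega
    obtain ⟨h1, h2⟩ := stepA_inv h m hm1 s hs hst
    exact ih (by omega) _ h1 h2

lemma jumpB_eq (h : List Int) (spans : List Int) (i : Nat) (hi : i < h.length)
    (hsp : ∀ k, i < k → k < h.length → spans.getD k 0 = (nsm h k : Int) - k) :
    ∀ (fuel : Nat) (j : Nat), i < j → j ≤ h.length →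
      (∀ m, i < m → m < j → h.getD i 0 ≤ h.getD m 0) →
      h.length - j ≤ fuel →
      jumpB h (h.length : Int) spans (h.getD i 0) fuel (j : Int) = ((nsm h i : Nat) : Int) := by
  intro fuel
  induction fuel with
  | zero =>
    intro j hij hjl hmin hf
    have hj : j = h.length := by omega
    subst hj
    unfold jumpB
    have : nsm h i = h.length := nsm_eq_of h i h.length (by omega) le_rfl hmin (Or.inl rfl)
    rw [this]
  | succ f ih =>
    intro j hij hjl hmin hf
    unfold jumpB
    by_cases hcond : (j : Int) < (h.length : Int) ∧ PySem.List.pyGetD h (j : Int) 0 ≥ h.getD i 0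
    · rw [if_pos hcond]
      obtain ⟨hjlt', hge⟩ := hcond
      have hjlt : j < h.length := by exact_mod_cast hjlt'
      rw [show PySem.List.pyGetD h (j : Int) 0 = h.getD j 0 by simp [PySem.List.pyGetD_natCast]] at hge
      have hspj : PySem.List.pyGetD spans (j : Int) 0 = (nsm h j : Int) - j := by
        rw [show PySem.List.pyGetD spans (j : Int) 0 = spans.getD j 0 by simp [PySem.List.pyGetD_natCast]]
        exact hsp j (by omega) hjlt
      have hng := nsm_gt h j
      have hnl := nsm_le h j hjlt
      rw [hspj, show (j : Int) + ((nsm h j : Int) - j) = ((nsm h j : Nat) : Int) from by ring]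
      exact ih (nsm h j) (by omega) hnl
        (fun m hm1 hm2 => by
          by_cases hmj : m < j
          · exact hmin m hm1 hmj
          · by_cases hmej : m = j
            · subst hmej; exact hge
            · exact le_trans hge (nsm_min h j m (by omega) hm2))
        (by omega)
    · rw [if_neg hcond]
      rw [not_and_or, not_lt, not_le] at hcond
      by_cases hjl' : j < h.length
      · have hlt : h.getD j 0 < h.getD i 0 := by
          rcases hcond with hc | hc
          · exact absurd hjl' (by exact_mod_cast not_lt.mpr hc)
          · rw [show PySem.List.pyGetD h (j : Int) 0 = h.getD j 0 by simp [PySem.List.pyGetD_natCast]] at hc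
            exact hc
        rw [nsm_eq_of h i j hij (by omega) hmin (Or.inr hlt)]
      · have hj : j = h.length := by omega
        subst hj
        rw [nsm_eq_of h i h.length (by omega) le_rfl hmin (Or.inl rfl)]

lemma stepB_inv (h : List Int) (i : Nat) (hi : i < h.length) (spans : List Int)
    (hs : SpansOK h (i + 1) spans) :
    SpansOK h i (stepB h (h.length : Int) spans (i : Int)) := by
  obtain ⟨hlen, hval⟩ := hs
  unfold stepB
  have hjump : jumpB h (h.length : Int) spans (PySem.List.pyGetD h (i : Int) 0) h.length ((i : Int) + 1)
      = ((nsm h i : Nat) : Int) := by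
    rw [show PySem.List.pyGetD h (i : Int) 0 = h.getD i 0 by simp [PySem.List.pyGetD_natCast]]
    rw [show (i : Int) + 1 = ((i + 1 : Nat) : Int) from by push_cast; ring]
    exact jumpB_eq h spans i hi
      (fun k hk1 hk2 => by rw [hval k hk2]; simp [Nat.succ_le_of_lt hk1])
      h.length (i + 1) (by omega) (by omega) (by omega) (by omega)
  rw [hjump, show PySem.List.pySetD spans (i : Int) (((nsm h i : Nat) : Int) - i) = spans.set i (((nsm h i : Nat) : Int) - i) by simp [PySem.List.pySetD_natCast]]
  refine ⟨by simp [hlen], ?_⟩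
  intro k hk
  rw [getD_set]
  by_cases hki : k = i
  · subst hki; simp [hlen, hk]
  · rw [if_neg (by simp [hki])]
    rw [hval k hk]
    split_ifs <;> omega

lemma foldB (h : List Int) : ∀ (n : Nat), n ≤ h.length → ∀ spans : List Int,
    SpansOK h n spans →
    SpansOK h 0 (((List.range n).reverse.map (Nat.cast : Nat → Int)).foldl (stepB h (h.length : Int)) spans) := by
  intro n
  induction n with
  | zero => intro _ spans hs; simpa using hs
  | succ m ih =>
    intro hn spans hs
    rw [List.range_succ, List.reverse_append]
    simp only [List.reverse_cons, List.reverse_nil, List.nil_append, List.map_cons,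
      List.singleton_append, List.foldl_cons]
    exact ih (by omega) _ (stepB_inv h m (by omega) spans hs)

lemma spansOK_unique (h : List Int) (s t : List Int)
    (hs : SpansOK h 0 s) (ht : SpansOK h 0 t) : s = t := by
  obtain ⟨hsl, hsv⟩ := hs
  obtain ⟨htl, htv⟩ := ht
  apply List.ext_getElem (by omega)
  intro k hk1 hk2
  have h1 := hsv k (by omega)
  have h2 := htv k (by omega)
  rw [List.getD_eq_getElem?_getD, List.getElem?_eq_getElem hk1] at h1
  rw [List.getD_eq_getElem?_getD, List.getElem?_eq_getElem hk2] at h2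
  simp only [Option.getD_some] at h1 h2
  rw [h1, h2]

lemma findRightSpan_eq_spec (h : List Int) (hne : h ≠ []) : SpansOK h 0 (findRightSpan h) := by
  unfold findRightSpan
  have hlpos : 0 < h.length := List.length_pos_iff.mpr hne
  have hsetneg : PySem.List.pySetD (List.replicate h.length (0 : Int)) (-1) 1
      = (List.replicate h.length (0 : Int)).set (h.length - 1) 1 := by
    simp [PySem.List.pySetD, PySem.List.pySet?, PySem.List.pyIdx?]
    rw [if_pos (by omega : 1 ≤ h.length)]
    rfl
  have hnsm_last : nsm h (h.length - 1) = h.length := by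
    unfold nsm nsmAux
    rw [dif_neg (by omega)]
    omega
  have hinit : SpansOK h (h.length - 1)
      ((List.replicate h.length (0 : Int)).set (h.length - 1) 1) := by
    refine ⟨by simp, ?_⟩
    intro k hk
    rw [getD_set]
    by_cases hki : k = h.length - 1
    · subst hki
      rw [if_pos ⟨rfl, by simp; omega⟩, if_pos le_rfl, hnsm_last]
      omega
    · rw [if_neg (by simp [hki]), if_neg (by omega)]
      simp [List.getD_eq_getElem?_getD]
  have hchain_init : ([((h.length : Int) - 1)] : List Int)
      = (chain h (h.length - 1)).map (Nat.cast : Nat → Int) := by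
    rw [chain, dif_neg (by omega)]
    simp
    omega
  have hrange : PySem.List.pyRange ((h.length : Int) - 2) (-1) (-1)
      = (List.range (h.length - 1)).reverse.map (Nat.cast : Nat → Int) := by
    rw [show ((h.length : Int) - 2) = ((h.length - 1 : Nat) : Int) - 1 from by push_cast [hlpos]; omega]
    exact pyRange_countdown (h.length - 1)
  simp only [hsetneg, hrange]
  rw [hchain_init] at *
  exact foldA h (h.length - 1) le_rfl
    ((List.replicate h.length (0 : Int)).set (h.length - 1) 1,
      (chain h (h.length - 1)).map (Nat.cast : Nat → Int)) hinit rfl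

lemma findRightSpan_alt_eq_spec (h : List Int) : SpansOK h 0 (findRightSpan_alt h) := by
  unfold findRightSpan_alt
  have hrange : PySem.List.pyRange ((h.length : Int) - 1) (-1) (-1)
      = (List.range h.length).reverse.map (Nat.cast : Nat → Int) := pyRange_countdown h.length
  simp only [hrange]
  exact foldB h h.length le_rfl (List.replicate h.length 0)
    ⟨by simp, fun k hk => by
      rw [if_neg (by omega)]
      simp [List.getD_eq_getElem?_getD]⟩

-- ===== VERDICT (by name: the statement is the Claim_ definition above) =====
theorem findRightSpan_spec : Claim_equal_findRightSpan := by
  intro h _ hpre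
  unfold Spec_findRightSpan
  exact spansOK_unique h _ _ (findRightSpan_eq_spec h hpre) (findRightSpan_alt_eq_spec h)
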